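-- pv_equiv track=rewrite | github.com/danzel-py/CTF-stuff | cryptopals/set1.py | getSingleKeyXorOfString
-- ===== SOURCE A (Python) =====
-- def getSingleKeyXorOfString(string):
--     somedict = {}
--     ascString = string
--     maxFreq = 0
--     for i in range(0,256):
--         ctr = 0
--         for cjar in ascString:
--             if (ord(cjar)^i > 64 and ord(cjar)^i < 91) or (ord(cjar)^i > 96 and ord(cjar)^i < 123) or (ord(cjar)^i == 32):
--                 ctr+=1
--         somedict[i] = ctr
--         maxFreq = max(maxFreq, ctr)
--
--     key = 0
--     for i in range(0,256):
--         if somedict[i] == maxFreq: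
--             key = i
--     res = ""
--     for cjar in ascString:
--         res += chr(ord(cjar)^key)
--     return key
-- ===== SOURCE B (Python) =====
-- def _scored(x):
--     return 64 < x < 91 or 96 < x < 123 or x == 32
--
--
-- def getSingleKeyXorOfString(string):
--     # Build a byte-value histogram once, then score each candidate key over the
--     # 256 histogram buckets instead of rescanning the string 256 times.
--     hist = [0] * 256
--     for c in string:
--         hist[ord(c)] += 1
--     key = 0
--     best = -1
--     for k in range(256):
--         score = sum(hist[b] for b in range(256) if _scored(b ^ k))
--         if best <= score:
--             best = score
--             key = k
--     return key
-- ===== Notes on version B (the rewrite author's own statement) =====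
-- stated objective: faster
-- what changed: B builds a 256-bucket byte histogram in one pass over the string and scores each candidate key over the buckets while tracking the running best, instead of rescanning the whole string for each of the 256 keys and then a second dict pass to pick the key.
import Mathlib
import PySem

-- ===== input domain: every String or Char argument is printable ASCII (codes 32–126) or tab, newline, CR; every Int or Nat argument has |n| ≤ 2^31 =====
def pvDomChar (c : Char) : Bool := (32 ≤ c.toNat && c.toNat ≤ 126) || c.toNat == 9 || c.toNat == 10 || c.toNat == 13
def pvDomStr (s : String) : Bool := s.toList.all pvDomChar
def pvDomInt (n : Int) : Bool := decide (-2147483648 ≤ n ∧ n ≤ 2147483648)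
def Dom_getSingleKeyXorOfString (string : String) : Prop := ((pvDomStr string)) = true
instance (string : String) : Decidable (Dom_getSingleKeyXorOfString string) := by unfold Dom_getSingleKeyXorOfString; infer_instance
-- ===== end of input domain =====

-- B replaces A's 256 rescans of the string by a one-pass byte histogram scored per key.


-- ===== PORT A =====
-- ord(cjar)^i : both operands nonnegative; PySem.Int.bxor is Python-exact
def getSingleKeyXorOfString (string : String) : Int :=
  let ascString := string.toList
  let st := (PySem.List.pyRange 0 256 1).foldl
    (fun (st : PySem.Dict Int Int × Int) i =>
      let ctr : Int := ascString.foldl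
        (fun ctr cjar =>
          if (64 < PySem.Int.bxor (cjar.toNat : Int) i ∧ PySem.Int.bxor (cjar.toNat : Int) i < 91)
             ∨ (96 < PySem.Int.bxor (cjar.toNat : Int) i ∧ PySem.Int.bxor (cjar.toNat : Int) i < 123)
             ∨ PySem.Int.bxor (cjar.toNat : Int) i = 32
          then ctr + 1 else ctr) 0
      (st.1.insert i ctr, max st.2 ctr))
    ((PySem.Dict.empty : PySem.Dict Int Int), (0 : Int))
  let key : Int := (PySem.List.pyRange 0 256 1).foldl
    (fun key i => if st.1.getD i 0 = st.2 then i else key) 0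
  -- dead 'res' string of A, kept for faithfulness (chr(ord(c)^key); key < 256 so valid)
  let _res : List Char := ascString.foldl
    (fun r cjar => r ++ [Char.ofNat ((PySem.Int.bxor (cjar.toNat : Int) key).toNat)]) []
  key

-- ===== PORT B =====
def pvScored (x : Nat) : Bool :=
  (64 < x && x < 91) || (96 < x && x < 123) || (x == 32)

-- hist[ord(c)] += 1 ported with List.set: exact on Dom (every code < 256, so in range)
def getSingleKeyXorOfString_alt (string : String) : Int :=
  let hist : List Int := string.toList.foldl
    (fun h c => h.set c.toNat (h.getD c.toNat 0 + 1)) (List.replicate 256 0)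
  let r := (List.range 256).foldl
    (fun (st : Int × Int) k =>
      let score := (List.range 256).foldl
        (fun s b => if pvScored (b ^^^ k) then s + hist.getD b 0 else s) 0
      if st.2 ≤ score then ((k : Int), score) else st)
    ((0 : Int), (-1 : Int))
  r.1

-- ===== PRECONDITION & SPEC =====
def Spec_getSingleKeyXorOfString (string : String) (out : Int) : Prop := out = getSingleKeyXorOfString_alt string
instance (string : String) (out : Int) : Decidable (Spec_getSingleKeyXorOfString string out) := by unfold Spec_getSingleKeyXorOfString; infer_instance

-- ===== CLAIM (what is proved, stated in full; the proofs are below) =====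
def Claim_equal_getSingleKeyXorOfString : Prop := ∀ (string : String), Dom_getSingleKeyXorOfString string → Spec_getSingleKeyXorOfString string (getSingleKeyXorOfString string)

-- ===== LEMMAS AND PROOFS =====

-- the per-key letter/space count both programs compute
def pvCnt (l : List Char) (k : Nat) : Int :=
  (l.countP (fun c => pvScored (c.toNat ^^^ k)) : Int)

-- A's inner loop counts pvCnt
theorem pvA_inner (l : List Char) (k : Nat) :
    l.foldl
      (fun ctr cjar =>
        if (64 < PySem.Int.bxor (cjar.toNat : Int) (k : Int) ∧ PySem.Int.bxor (cjar.toNat : Int) (k : Int) < 91)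
           ∨ (96 < PySem.Int.bxor (cjar.toNat : Int) (k : Int) ∧ PySem.Int.bxor (cjar.toNat : Int) (k : Int) < 123)
           ∨ PySem.Int.bxor (cjar.toNat : Int) (k : Int) = 32
        then ctr + 1 else ctr) 0 = pvCnt l k := by
  rw [PySem.List.foldl_ite_add_one]
  unfold pvCnt
  rw [zero_add]
  congr 1
  apply List.countP_congr
  intro c _
  simp [pvScored, PySem.Int.bxor_natCast]
  omega

-- dict built by an insert loop with state-independent values: lookups read the function
theorem pvDict_getD (g : Int → Int) (L : List Int) (d : PySem.Dict Int Int) (j : Int) (v : Int) :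
    (L.foldl (fun d i => d.insert i (g i)) d).getD j v = if j ∈ L then g j else d.getD j v := by
  induction L generalizing d with
  | nil => simp
  | cons a L ih =>
    simp only [List.foldl_cons, ih, List.mem_cons]
    rw [PySem.Dict.getD_insert]
    by_cases h1 : j ∈ L <;> by_cases h2 : j = a <;> simp [h1, h2]

-- histogram lookup is a character count
theorem pvHist_aux (l : List Char) (hl : ∀ c ∈ l, c.toNat < 256) (b : Nat)
    (h : List Int) (hlen : h.length = 256) :
    (l.foldl (fun h c => h.set c.toNat (h.getD c.toNat 0 + 1)) h).getD b 0
      = h.getD b 0 + (l.countP (fun c => c.toNat == b) : Int) := by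
  induction l generalizing h with
  | nil => simp
  | cons c l ih =>
    have hc : c.toNat < 256 := hl c (by simp)
    simp only [List.foldl_cons]
    rw [ih (fun x hx => hl x (by simp [hx])) (h.set c.toNat (h.getD c.toNat 0 + 1)) (by simp [hlen])]
    rw [List.countP_cons]
    have hset : (h.set c.toNat (h.getD c.toNat 0 + 1)).getD b 0
        = if c.toNat = b then h.getD b 0 + 1 else h.getD b 0 := by
      by_cases he : c.toNat = b
      · subst he
        simp [List.getD, hlen, hc]
      · simp [List.getD, he]
    rw [hset]
    by_cases he : c.toNat = b
    · simp [he]; ring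
    · simp [he]

-- sum of a 0/1 indicator over a duplicate-free list
theorem pvSum_ind (F : List Nat) (hF : F.Nodup) (t : Nat) :
    (F.map (fun b => if t = b then (1 : Int) else 0)).sum = if t ∈ F then 1 else 0 := by
  induction F with
  | nil => simp
  | cons a F ih =>
    simp only [List.map_cons, List.sum_cons, List.mem_cons]
    rcases List.nodup_cons.mp hF with ⟨ha, hF'⟩
    by_cases he : t = a
    · subst he
      simp [ha, ih hF']
    · simp [he, ih hF']

-- summing per-bucket counts over the buckets a predicate selects counts the predicate
theorem pvSum_count (F : List Nat) (hF : F.Nodup) (P : Char → Bool) (l : List Char)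
    (hmem : ∀ c ∈ l, (c.toNat ∈ F ↔ P c = true)) :
    (F.map (fun b => (l.countP (fun c => c.toNat == b) : Int))).sum = (l.countP P : Int) := by
  induction l with
  | nil => simp
  | cons c l ih =>
    have hmem' : ∀ x ∈ l, (x.toNat ∈ F ↔ P x = true) := fun x hx => hmem x (by simp [hx])
    simp only [List.countP_cons]
    push_cast
    have hsplit : (F.map (fun b => ((l.countP (fun c => c.toNat == b) : Int) + if c.toNat = b then 1 else 0))).sum
        = (F.map (fun b => (l.countP (fun c => c.toNat == b) : Int))).sum
          + (F.map (fun b => if c.toNat = b then (1 : Int) else 0)).sum := by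
      rw [← List.sum_map_add]
    calc (F.map (fun b => ((l.countP (fun c => c.toNat == b) : Int) + if (c.toNat == b) = true then (1:Int) else 0))).sum
        = (F.map (fun b => (l.countP (fun c => c.toNat == b) : Int))).sum
          + (F.map (fun b => if c.toNat = b then (1 : Int) else 0)).sum := by
          simp only [beq_iff_eq]; exact hsplit
      _ = (l.countP P : Int) + if P c = true then (1:Int) else 0 := by
          rw [ih hmem', pvSum_ind F hF c.toNat]
          congr 1
          by_cases hp : P c = true
          · simp [hp, (hmem c (by simp)).mpr hp]
          · have : c.toNat ∉ F := fun hin => hp ((hmem c (by simp)).mp hin)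
            simp [hp, this]
      _ = _ := by by_cases hp : P c = true <;> simp [hp]

-- B's score over the 256 buckets equals the direct count
theorem pvScore_eq (l : List Char) (hl : ∀ c ∈ l, c.toNat < 256) (k : Nat) :
    (List.range 256).foldl
      (fun s b => if pvScored (b ^^^ k) then s
        + (l.foldl (fun h c => h.set c.toNat (h.getD c.toNat 0 + 1)) (List.replicate 256 (0 : Int))).getD b 0
        else s) 0 = pvCnt l k := by
  rw [PySem.List.foldl_if_eq_foldl_filter, PySem.List.foldl_add]
  have hmap : ((List.range 256).filter (fun b => pvScored (b ^^^ k))).map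
      (fun b => (l.foldl (fun h c => h.set c.toNat (h.getD c.toNat 0 + 1)) (List.replicate 256 (0 : Int))).getD b 0)
      = ((List.range 256).filter (fun b => pvScored (b ^^^ k))).map
        (fun b => (l.countP (fun c => c.toNat == b) : Int)) := by
    apply List.map_congr_left
    intro b _
    rw [pvHist_aux l hl b (List.replicate 256 0) (by rw [List.length_replicate])]
    have hrep : (List.replicate 256 (0:Int)).getD b 0 = 0 := by
      rcases Nat.lt_or_ge b 256 with h | h
      · rw [List.getD_eq_getElem _ _ (by rw [List.length_replicate]; exact h)]
        exact List.getElem_replicate _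
      · rw [List.getD_eq_default _ _ (by rw [List.length_replicate]; exact h)]
    rw [hrep, zero_add]
  rw [hmap, zero_add]
  apply pvSum_count
  · exact (List.nodup_range).filter _
  · intro c hc
    simp only [List.mem_filter, List.mem_range]
    constructor
    · exact fun ⟨_, h⟩ => h
    · exact fun h => ⟨hl c hc, h⟩

-- selection of the last maximal key: two-pass (max, then last index) vs one-pass running pair
theorem pvSel_eq (g : Nat → Int) (hg : ∀ j, 0 ≤ g j) (n : Nat) (hn : 1 ≤ n) :
    ((List.range n).foldl (fun st k => if st.2 ≤ g k then ((k : Int), g k) else st) ((0 : Int), (-1 : Int)))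
      = ((List.range n).foldl
           (fun key i => if g i = (List.range n).foldl (fun m j => max m (g j)) 0 then (i : Int) else key) 0,
         (List.range n).foldl (fun m j => max m (g j)) 0) := by
  induction n with
  | zero => omega
  | succ n ih =>
    by_cases hn1 : 1 ≤ n
    case neg =>
      have h0 : n = 0 := by omega
      subst h0
      have := hg 0
      simp [List.range_succ, this]
      omega
    case pos =>
      have ih' := ih hn1
      set M : Int := (List.range n).foldl (fun m j => max m (g j)) 0 with hM
      have hMn : (List.range n ++ [n]).foldl (fun m j => max m (g j)) 0 = max M (g n) := by
        rw [List.foldl_append]; rfl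
      rw [List.range_succ, List.foldl_append, ih']
      simp only [List.foldl_append, List.foldl_cons, List.foldl_nil, hMn]
      by_cases hcase : M ≤ g n
      · have hmax : max M (g n) = g n := max_eq_right hcase
        rw [if_pos hcase]
        simp [hmax]
      · have hmax : max M (g n) = M := max_eq_left (le_of_not_ge hcase)
        rw [if_neg hcase]
        have hne : ¬ (g n = M) := fun he => hcase (le_of_eq he.symm)
        simp [hmax, hne]

theorem pvFst {A B : Type} (a : A) (b : B) : (a, b).1 = a := rfl
theorem pvSnd {A B : Type} (a : A) (b : B) : (a, b).2 = b := rfl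

-- ===== VERDICT (by name: the statement is the Claim_ definition above) =====
set_option maxRecDepth 10000 in
set_option maxHeartbeats 2000000 in
theorem getSingleKeyXorOfString_spec : Claim_equal_getSingleKeyXorOfString := by
  intro s hdom
  unfold Spec_getSingleKeyXorOfString getSingleKeyXorOfString getSingleKeyXorOfString_alt
  set l := s.toList
  have hl : ∀ c ∈ l, c.toNat < 256 := by
    intro c hc
    have := List.all_eq_true.mp hdom c hc
    simp [pvDomChar] at this
    omega
  have hrange : PySem.List.pyRange 0 256 1 = (List.range 256).map (fun k : Nat => (k : Int)) := by
    rw [PySem.List.pyRange_one]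
    simp
  simp only [hrange, List.foldl_map, pvA_inner l]
  have hpair : ∀ (L : List Nat) (d0 : PySem.Dict Int Int) (m0 : Int),
      L.foldl (fun (x : PySem.Dict Int Int × Int) (y : Nat) =>
        (x.1.insert (y : Int) (pvCnt l y), max x.2 (pvCnt l y))) (d0, m0)
      = (L.foldl (fun d (y : Nat) => d.insert (y : Int) (pvCnt l y)) d0,
         L.foldl (fun m (y : Nat) => max m (pvCnt l y)) m0) := by
    intro L
    induction L with
    | nil => intro d0 m0; rfl
    | cons a t ih => intro d0 m0; simp only [List.foldl_cons]; exact ih _ _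
  have hdictD : ∀ y : Nat, y < 256 →
      ((List.range 256).foldl (fun d (y : Nat) => d.insert (y : Int) (pvCnt l y)) PySem.Dict.empty).getD (y : Int) 0
        = pvCnt l y := by
    intro y hy
    have h := pvDict_getD (fun i => pvCnt l i.toNat) ((List.range 256).map (fun k : Nat => (k : Int)))
      PySem.Dict.empty (y : Int) 0
    rw [List.foldl_map] at h
    simp only [Int.toNat_natCast] at h
    rw [h]
    have hm : (y : Int) ∈ (List.range 256).map (fun k : Nat => (k : Int)) :=
      List.mem_map.mpr ⟨y, List.mem_range.mpr hy, rfl⟩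
    simp [hm]
  rw [hpair]
  trans ((List.range 256).foldl (fun (key : Int) (y : Nat) =>
      if pvCnt l y = (List.range 256).foldl (fun (m : Int) (y : Nat) => max m (pvCnt l y)) 0
      then (y : Int) else key) 0)
  · apply PySem.List.foldl_congr_mem
    intro acc y hy
    rw [pvFst, pvSnd, hdictD y (List.mem_range.mp hy)]
  · trans ((List.range 256).foldl (fun (st : Int × Int) (k : Nat) =>
        if st.2 ≤ pvCnt l k then ((k : Int), pvCnt l k) else st) ((0 : Int), (-1 : Int))).1
    · rw [pvSel_eq (fun k => pvCnt l k) (fun j => Int.natCast_nonneg _) 256 (by norm_num), pvFst]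
    · exact (congrArg Prod.fst (PySem.List.foldl_congr_mem _ _ _ _ (by
        intro st k hk
        rw [pvScore_eq l hl]))).symm
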